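-- pv_equiv track=rewrite | github.com/Alrudin/Splunk_auto_doc | backend/app/parser/core.py | _remove_inline_comment
-- ===== SOURCE A (Python) =====
-- def _remove_inline_comment(value: str) -> str:
--     """Remove inline comments from a value, preserving # in quotes.
--
--     Args:
--         value: The value to process
--
--     Returns:
--         Value with inline comment removed
--     """
--     # Simple heuristic: only remove # if not in quotes
--     # This is a simplified version - Splunk's actual behavior is complex
--     in_quotes = False
--     for i, char in enumerate(value):
--         if char in ('"', "'"):
--             in_quotes = not in_quotes
--         elif char == "#" and not in_quotes:
--             # Found inline comment
--             return value[:i].rstrip()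
--     return value
-- ===== SOURCE B (Python) =====
-- def _remove_inline_comment(value: str) -> str:
--     """Remove inline comments from a value, preserving # in quotes."""
--     for i, ch in enumerate(value):
--         if ch == "#" and (value.count('"', 0, i) + value.count("'", 0, i)) % 2 == 0:
--             return value[:i].rstrip()
--     return value
-- ===== Notes on version B (the rewrite author's own statement) =====
-- stated objective: alternative
-- what changed: Replaces the running in_quotes toggle with a stateless per-candidate test: at each candidate comment character, the quote characters in the preceding prefix are counted and the comment is cut exactly when that count is even.
import Mathlib
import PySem

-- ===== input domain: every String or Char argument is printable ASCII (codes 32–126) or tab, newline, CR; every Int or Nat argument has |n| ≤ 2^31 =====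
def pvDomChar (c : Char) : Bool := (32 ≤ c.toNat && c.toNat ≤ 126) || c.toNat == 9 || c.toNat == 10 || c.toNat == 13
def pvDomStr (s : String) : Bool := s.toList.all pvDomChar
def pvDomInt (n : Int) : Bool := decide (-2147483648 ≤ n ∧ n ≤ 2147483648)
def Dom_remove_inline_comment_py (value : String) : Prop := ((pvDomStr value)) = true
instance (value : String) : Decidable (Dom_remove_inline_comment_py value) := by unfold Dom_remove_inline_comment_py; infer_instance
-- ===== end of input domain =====

-- B replaces A's running in_quotes toggle with a stateless parity count of quote
-- characters in the prefix before each '#' candidate (objective: alternative).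


-- ===== PORT A =====
-- A's for-loop: in_quotes toggle, prefix accumulator stands for value[:i]
def remICgoA : List Char → Bool → List Char → Option (List Char)
  | [], _, _ => none
  | c :: rest, inq, pre =>
    if c = '"' ∨ c = '\'' then remICgoA rest (!inq) (pre ++ [c])
    else if c = '#' ∧ inq = false then some (PySem.Chars.rstrip pre)
    else remICgoA rest inq (pre ++ [c])

def remove_inline_comment_py (value : String) : String :=
  match remICgoA value.toList false [] with
  | some r => String.ofList r
  | none => value

-- ===== PORT B =====
-- B's loop: enumerate with index; at each '#' test parity of quotes in value[:i]
def remICgoB (s : List Char) : List Char → Nat → Option (List Char)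
  | [], _ => none
  | c :: rest, i =>
    if c = '#' ∧ ((s.take i).count '"' + (s.take i).count '\'') % 2 = 0
    then some (PySem.Chars.rstrip (s.take i))
    else remICgoB s rest (i + 1)

def remove_inline_comment_py_alt (value : String) : String :=
  match remICgoB value.toList value.toList 0 with
  | some r => String.ofList r
  | none => value

-- ===== PRECONDITION & SPEC =====
def Spec_remove_inline_comment_py (value : String) (out : String) : Prop := out = remove_inline_comment_py_alt value
instance (value : String) (out : String) : Decidable (Spec_remove_inline_comment_py value out) := by unfold Spec_remove_inline_comment_py; infer_instance

-- ===== CLAIM (what is proved, stated in full; the proofs are below) =====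
def Claim_equal_remove_inline_comment_py : Prop := ∀ (value : String), Dom_remove_inline_comment_py value → Spec_remove_inline_comment_py value (remove_inline_comment_py value)

-- ===== LEMMAS AND PROOFS =====

-- the invariant parity: in_quotes ↔ odd number of quotes seen so far
def remICpar (pre : List Char) : Bool := decide ((pre.count '"' + pre.count '\'') % 2 = 1)

lemma remICpar_quote (pre : List Char) (c : Char) (h : c = '"' ∨ c = '\'') :
    remICpar (pre ++ [c]) = !(remICpar pre) := by
  rcases h with h | h <;> subst h <;>
    simp [remICpar, List.count_append, ← decide_not, decide_eq_decide] <;> omega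

lemma remICpar_other (pre : List Char) (c : Char) (h : ¬(c = '"' ∨ c = '\'')) :
    remICpar (pre ++ [c]) = remICpar pre := by
  push Not at h
  simp [remICpar, List.count_append, h.1, h.2]

lemma remICgo_eq : ∀ (rest pre : List Char),
    remICgoA rest (remICpar pre) pre = remICgoB (pre ++ rest) rest pre.length := by
  intro rest
  induction rest with
  | nil => intro pre; simp [remICgoA, remICgoB]
  | cons c rest ih =>
    intro pre
    have htake : (pre ++ c :: rest).take pre.length = pre := by
      simp
    by_cases hq : c = '"' ∨ c = '\''
    · simp only [remICgoA, remICgoB, if_pos hq, htake]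
      rw [if_neg (by rintro ⟨hh, _⟩; rcases hq with h | h <;> subst h <;> simp at hh)]
      rw [← remICpar_quote pre c hq, ih (pre ++ [c])]
      simp
    · by_cases hh : c = '#'
      · subst hh
        by_cases hin : remICpar pre = false
        · simp only [remICgoA, remICgoB, if_neg hq, htake]
          rw [if_pos ⟨by trivial, hin⟩]
          have hpar : (pre.count '"' + pre.count '\'') % 2 = 0 := by
            simpa [remICpar] using hin
          rw [if_pos ⟨by trivial, hpar⟩]
        · have hin' : remICpar pre = true := by
            cases h : remICpar pre
            · exact absurd h hin
            · rfl
          have hpar : ¬((pre.count '"' + pre.count '\'') % 2 = 0) := by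
            have h1 : (pre.count '"' + pre.count '\'') % 2 = 1 := by
              simpa [remICpar] using hin'
            omega
          simp only [remICgoA, remICgoB, if_neg hq, htake]
          rw [if_neg (by rintro ⟨_, h⟩; exact hin h), if_neg (by rintro ⟨_, h⟩; exact hpar h)]
          rw [← remICpar_other pre '#' hq, ih (pre ++ ['#'])]
          simp
      · simp only [remICgoA, remICgoB, if_neg hq, htake]
        rw [if_neg (by rintro ⟨h, _⟩; exact hh h), if_neg (by rintro ⟨h, _⟩; exact hh h)]
        rw [← remICpar_other pre c hq, ih (pre ++ [c])]
        simp

-- ===== VERDICT (by name: the statement is the Claim_ definition above) =====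
theorem remove_inline_comment_py_spec : Claim_equal_remove_inline_comment_py := by
  intro value _
  unfold Spec_remove_inline_comment_py remove_inline_comment_py remove_inline_comment_py_alt
  have h := remICgo_eq value.toList []
  simp [remICpar] at h
  rw [h]
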